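-- pv_equiv track=rewrite | github.com/pypi-data/pypi-mirror-403 | packages/graph-of-mark/graph_of_mark-1.0.1.tar.gz/graph_of_mark-1.0.1/src/gom/viz/visualizer.py | _get_relation_priority
-- ===== SOURCE A (Python) =====
-- def _get_relation_priority(relation: str) -> int:
--     """
--     Assign priority level to relationship type for visualization.
--
--     Prioritizes more specific, semantically meaningful relationships over
--     generic spatial relationships.
--
--     Args:
--         relation: Relationship type string (e.g., "on_top_of", "near", "left_of")
--
--     Returns:
--         Priority level (0-4, higher is more important)
--
--     Priority Levels:
--         4 - Contact/support: on_top_of, under, holding, wearing, riding, sitting_on, carrying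
--         3 - Proximity: touching, adjacent
--         2 - Distance: near, close
--         1 - Directional: left_of, right_of, above, below, in_front_of, behind
--         0 - Generic/other: all other relationships
--
--     Notes:
--         - Case-insensitive matching
--         - Uses substring matching (e.g., "on_top_of_table" matches priority 4)
--         - Contact relationships most informative for scene understanding
--     """
--     rel_name = str(relation).lower()
--     if any(k in rel_name for k in {"on_top_of", "under", "holding", "wearing", "riding", "sitting_on", "carrying"}):
--         return 4
--     if any(k in rel_name for k in {"touching", "adjacent"}):
--         return 3
--     if any(k in rel_name for k in {"near", "close"}):
--         return 2
--     if any(k in rel_name for k in {"left_of", "right_of", "above", "below", "in_front_of", "behind"}):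
--         return 1
--     return 0
-- ===== SOURCE B (Python) =====
-- _PRIORITY = {
--     "on_top_of": 4, "under": 4, "holding": 4, "wearing": 4,
--     "riding": 4, "sitting_on": 4, "carrying": 4,
--     "touching": 3, "adjacent": 3,
--     "near": 2, "close": 2,
--     "left_of": 1, "right_of": 1, "above": 1, "below": 1,
--     "in_front_of": 1, "behind": 1,
-- }
--
--
-- def _get_relation_priority(relation: str) -> int:
--     rel_name = str(relation).lower()
--     best = 0
--     for kw, lvl in _PRIORITY.items():
--         if kw in rel_name and lvl > best:
--             best = lvl
--     return best
-- ===== Notes on version B (the rewrite author's own statement) =====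
-- stated objective: simpler
-- what changed: Replaces the four tiered any()/early-return checks with one flat keyword->level table scanned in a single loop that keeps the best matching level.
import Mathlib
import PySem

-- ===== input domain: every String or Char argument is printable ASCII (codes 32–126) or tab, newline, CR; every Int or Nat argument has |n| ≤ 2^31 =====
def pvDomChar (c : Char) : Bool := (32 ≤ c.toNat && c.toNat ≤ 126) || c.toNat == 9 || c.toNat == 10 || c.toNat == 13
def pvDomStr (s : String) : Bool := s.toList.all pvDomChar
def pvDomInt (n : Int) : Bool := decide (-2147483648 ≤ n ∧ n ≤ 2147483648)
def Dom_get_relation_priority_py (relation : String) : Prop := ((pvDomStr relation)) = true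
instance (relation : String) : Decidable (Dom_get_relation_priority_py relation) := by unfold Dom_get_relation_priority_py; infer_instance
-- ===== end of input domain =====

-- B replaces A's four tiered any()/early-return checks with one flat keyword→level table
-- scanned in a single best-so-far loop; return value only, no side effects.

-- ===== PORT A =====
def pvTier4 : List String := ["on_top_of", "under", "holding", "wearing", "riding", "sitting_on", "carrying"]
def pvTier3 : List String := ["touching", "adjacent"]
def pvTier2 : List String := ["near", "close"]
def pvTier1 : List String := ["left_of", "right_of", "above", "below", "in_front_of", "behind"]

def get_relation_priority_py (relation : String) : Int :=
  let rel_name := PySem.Str.lower relation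
  if pvTier4.any (fun k => PySem.Str.isIn k rel_name) then 4
  else if pvTier3.any (fun k => PySem.Str.isIn k rel_name) then 3
  else if pvTier2.any (fun k => PySem.Str.isIn k rel_name) then 2
  else if pvTier1.any (fun k => PySem.Str.isIn k rel_name) then 1
  else 0

-- ===== PORT B =====
def pvPriorityTable : List (String × Int) :=
  [("on_top_of", 4), ("under", 4), ("holding", 4), ("wearing", 4),
   ("riding", 4), ("sitting_on", 4), ("carrying", 4),
   ("touching", 3), ("adjacent", 3),
   ("near", 2), ("close", 2),
   ("left_of", 1), ("right_of", 1), ("above", 1), ("below", 1),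
   ("in_front_of", 1), ("behind", 1)]

def pvStep (rel_name : String) (best : Int) (p : String × Int) : Int :=
  if PySem.Str.isIn p.1 rel_name && decide (best < p.2) then p.2 else best

def get_relation_priority_py_alt (relation : String) : Int :=
  let rel_name := PySem.Str.lower relation
  pvPriorityTable.foldl (pvStep rel_name) 0

-- ===== PRECONDITION & SPEC =====
def Spec_get_relation_priority_py (relation : String) (out : Int) : Prop := out = get_relation_priority_py_alt relation
instance (relation : String) (out : Int) : Decidable (Spec_get_relation_priority_py relation out) := by unfold Spec_get_relation_priority_py; infer_instance

-- ===== CLAIM (what is proved, stated in full; the proofs are below) =====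
def Claim_equal_get_relation_priority_py : Prop := ∀ (relation : String), Dom_get_relation_priority_py relation → Spec_get_relation_priority_py relation (get_relation_priority_py relation)

-- ===== LEMMAS AND PROOFS =====

-- The flat table is the concatenation of the four tiers, each at a constant level.
theorem pvTable_eq :
    pvPriorityTable =
      pvTier4.map (fun k => (k, (4 : Int))) ++ pvTier3.map (fun k => (k, (3 : Int)))
      ++ pvTier2.map (fun k => (k, (2 : Int))) ++ pvTier1.map (fun k => (k, (1 : Int))) := by
  rfl

-- Scanning a constant-level block with best already ≥ the level changes nothing.
theorem pvFold_ge (rel : String) (v a : Int) (kws : List String) (h : v ≤ a) :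
    (kws.map (fun k => (k, v))).foldl (pvStep rel) a = a := by
  induction kws with
  | nil => rfl
  | cons k ks ih =>
      simp only [List.map_cons, List.foldl_cons, pvStep]
      rw [decide_eq_false (not_lt.mpr h)]
      simp only [Bool.and_false, Bool.false_eq_true, if_false]
      exact ih

-- Scanning a constant-level block with best below the level yields the level iff some keyword matches.
theorem pvFold_hit (rel : String) (v a : Int) (kws : List String) (h : a < v) :
    (kws.map (fun k => (k, v))).foldl (pvStep rel) a =
      if kws.any (fun k => PySem.Str.isIn k rel) then v else a := by
  induction kws with
  | nil => simp
  | cons k ks ih =>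
      simp only [List.map_cons, List.foldl_cons, List.any_cons, pvStep]
      rcases Bool.eq_false_or_eq_true (PySem.Str.isIn k rel) with hk | hk <;> simp only [hk]
      · simp [decide_eq_true h, pvFold_ge rel v v ks (le_refl v)]
      · simpa using ih

-- ===== VERDICT (by name: the statement is the Claim_ definition above) =====
theorem get_relation_priority_py_spec : Claim_equal_get_relation_priority_py := by
  intro relation _
  simp only [Spec_get_relation_priority_py, get_relation_priority_py, get_relation_priority_py_alt]
  set rel := PySem.Str.lower relation with hrel
  rw [pvTable_eq, List.foldl_append, List.foldl_append, List.foldl_append]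
  by_cases h4 : (pvTier4.any fun k => PySem.Str.isIn k rel) = true
  · rw [if_pos h4, pvFold_hit rel 4 0 _ (by norm_num), if_pos h4,
      pvFold_ge rel 3 4 _ (by norm_num), pvFold_ge rel 2 4 _ (by norm_num),
      pvFold_ge rel 1 4 _ (by norm_num)]
  · rw [if_neg h4, pvFold_hit rel 4 0 _ (by norm_num), if_neg h4]
    by_cases h3 : (pvTier3.any fun k => PySem.Str.isIn k rel) = true
    · rw [if_pos h3, pvFold_hit rel 3 0 _ (by norm_num), if_pos h3,
        pvFold_ge rel 2 3 _ (by norm_num), pvFold_ge rel 1 3 _ (by norm_num)]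
    · rw [if_neg h3, pvFold_hit rel 3 0 _ (by norm_num), if_neg h3]
      by_cases h2 : (pvTier2.any fun k => PySem.Str.isIn k rel) = true
      · rw [if_pos h2, pvFold_hit rel 2 0 _ (by norm_num), if_pos h2,
          pvFold_ge rel 1 2 _ (by norm_num)]
      · rw [if_neg h2, pvFold_hit rel 2 0 _ (by norm_num), if_neg h2]
        by_cases h1 : (pvTier1.any fun k => PySem.Str.isIn k rel) = true
        · rw [if_pos h1, pvFold_hit rel 1 0 _ (by norm_num), if_pos h1]
        · rw [if_neg h1, pvFold_hit rel 1 0 _ (by norm_num), if_neg h1]
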